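-- pv_equiv track=rewrite | github.com/arunherga/Python_set3_solution | Exercise2_Problem_9.py | reading_time
-- ===== SOURCE A (Python) =====
-- def reading_time(article):
--     text = list(article.split(" "))
--     text_1 = []
--     for word in text:
--         result = ""
--         for i in word:
--             if i.isalpha():
--                 result = ''.join([result,i])
--         text_1.append(result)
--
--     time = 0
--     check = []
--     for word in text_1:
--         if word in check:
--             time += 1
--         else:
--             time += len(word)
--             check.append(word)
--     return time
-- ===== SOURCE B (Python) =====
-- def reading_time(article):
--     # Consume the cleaned word list group by group: take the head word, strip ALL its
--     # other occurrences out of the tail, charge len(word) + number_of_duplicates, repeat.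
--     ws = [''.join(c for c in w if c.isalpha()) for w in article.split(" ")]
--     time = 0
--     while ws:
--         w = ws[0]
--         rest = ws[1:]
--         rest2 = [x for x in rest if x != w]
--         time += len(w) + (len(rest) - len(rest2))
--         ws = rest2
--     return time
-- ===== Notes on version B (the rewrite author's own statement) =====
-- stated objective: alternative
-- what changed: Instead of A's per-word scan of a growing seen-list, B consumes the cleaned word list group by group: it takes the head word, deletes every other occurrence of it from the tail in one filter pass, charges len(word) plus the number of deleted duplicates, and loops on the shrunken list; no seen-set or membership test exists.
import Mathlib
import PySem

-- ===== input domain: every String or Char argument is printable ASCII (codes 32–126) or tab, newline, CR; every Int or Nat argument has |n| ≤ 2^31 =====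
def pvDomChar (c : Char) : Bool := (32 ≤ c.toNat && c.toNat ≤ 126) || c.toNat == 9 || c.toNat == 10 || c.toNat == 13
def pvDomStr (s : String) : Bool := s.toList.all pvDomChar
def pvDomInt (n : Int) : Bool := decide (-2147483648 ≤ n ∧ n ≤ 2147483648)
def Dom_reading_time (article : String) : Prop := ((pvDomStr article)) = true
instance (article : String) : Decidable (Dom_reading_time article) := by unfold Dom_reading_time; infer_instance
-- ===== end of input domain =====

-- B consumes the cleaned word list group by group (delete all duplicates of the head, charge
-- len + deleted count, recurse on the shrunken list) instead of A's per-word seen-list scan (alternative).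

-- ===== PORT A =====
-- words as List Char; ''.join([result, i]) is result ++ [i] on code points (exact)
def reading_time (article : String) : Int :=
  let text := PySem.Chars.splitOn article.toList [' ']
  let text1 : List (List Char) := text.foldl (fun acc word =>
      acc ++ [word.foldl
        (fun result i => if PySem.Chars.isalpha i then result ++ [i] else result) []]) []
  let tc : Int × List (List Char) := text1.foldl (fun st word =>
      if word ∈ st.2 then (st.1 + 1, st.2)
      else (st.1 + (PySem.Chars.len word : Int), st.2 ++ [word])) (0, [])
  tc.1

-- ===== PORT B =====
-- the while loop of Source B: head word, filter its duplicates out of the tail, charge, loop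
def rtGo : List (List Char) → Int
  | [] => 0
  | w :: rest =>
    let rest2 := rest.filter (fun x => decide (x ≠ w))
    (PySem.Chars.len w : Int) + ((rest.length : Int) - (rest2.length : Int)) + rtGo rest2
termination_by ws => ws.length
decreasing_by
  have h := List.length_filter_le (fun x : {x // x ∈ rest} => decide (x.1 ≠ w)) rest.attach
  simp at h ⊢
  omega

def reading_time_alt (article : String) : Int :=
  rtGo ((PySem.Chars.splitOn article.toList [' ']).map
    (fun w => w.foldl (fun acc c => if PySem.Chars.isalpha c then acc ++ [c] else acc) []))

-- ===== PRECONDITION & SPEC =====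
def Spec_reading_time (article : String) (out : Int) : Prop := out = reading_time_alt article
instance (article : String) (out : Int) : Decidable (Spec_reading_time article out) := by unfold Spec_reading_time; infer_instance

-- ===== CLAIM (what is proved, stated in full; the proofs are below) =====
def Claim_equal_reading_time : Prop := ∀ (article : String), Dom_reading_time article → Spec_reading_time article (reading_time article)

-- ===== LEMMAS AND PROOFS =====

-- A's check-loop, generalized over the accumulator
theorem loopA (ws : List (List Char)) (t : Int) (s : List (List Char)) :
    ws.foldl (fun st word =>
      if word ∈ st.2 then (st.1 + 1, st.2)
      else (st.1 + (PySem.Chars.len word : Int), st.2 ++ [word])) (t, s)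
    = (t + ws.length
        + (((ws.foldl PySem.Set.add s).map (fun k => (PySem.Chars.len k : Int) - 1)).sum
           - ((s.map (fun k => (PySem.Chars.len k : Int) - 1)).sum)),
       ws.foldl PySem.Set.add s) := by
  induction ws generalizing t s with
  | nil => simp
  | cons w ws ih =>
    by_cases hw : w ∈ s
    · have hadd : PySem.Set.add s w = s := by
        simp [PySem.Set.add, PySem.Set.contains, hw]
      simp only [List.foldl_cons, if_pos hw, hadd, ih]
      rw [Prod.mk.injEq]
      refine ⟨?_, rfl⟩
      push_cast [List.length_cons]; ring
    · have hadd : PySem.Set.add s w = s ++ [w] := by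
        simp [PySem.Set.add, PySem.Set.contains, hw]
      simp only [List.foldl_cons, if_neg hw, hadd, ih, List.map_append, List.sum_append,
        List.map_cons, List.map_nil, List.sum_cons, List.sum_nil]
      rw [Prod.mk.injEq]
      refine ⟨?_, rfl⟩
      push_cast [List.length_cons]; ring

-- the distinct elements of w::rest are, up to permutation, w plus those of rest-with-w-removed
theorem ofList_cons_perm (w : List Char) (rest : List (List Char)) :
    (PySem.Set.ofList (w :: rest)).Perm
      (w :: PySem.Set.ofList (rest.filter (fun x => decide (x ≠ w)))) := by
  rw [List.perm_ext_iff_of_nodup (PySem.Set.nodup_ofList _)]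
  · intro a
    simp only [PySem.Set.mem_ofList, List.mem_cons, PySem.Set.mem_ofList, List.mem_filter,
      decide_eq_true_eq]
    constructor
    · rintro (rfl | ha)
      · exact Or.inl rfl
      · by_cases haw : a = w
        · exact Or.inl haw
        · exact Or.inr ⟨ha, haw⟩
    · rintro (rfl | ⟨ha, _⟩)
      · exact Or.inl rfl
      · exact Or.inr ha
  · refine List.nodup_cons.mpr ⟨?_, PySem.Set.nodup_ofList _⟩
    intro hmem
    rcases List.mem_filter.mp ((PySem.Set.mem_ofList _ _).mp hmem) with ⟨_, hne⟩
    exact (decide_eq_true_eq.mp hne) rfl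

-- B's loop computes word count plus sum of (len - 1) over the distinct words
theorem rtGo_eq_aux (n : Nat) : ∀ ws : List (List Char), ws.length ≤ n →
    rtGo ws = (ws.length : Int)
      + ((PySem.Set.ofList ws).map (fun k => (PySem.Chars.len k : Int) - 1)).sum := by
  induction n with
  | zero =>
    intro ws hws
    rw [List.length_eq_zero_iff.mp (Nat.le_zero.mp hws)]
    simp [rtGo.eq_def, PySem.Set.ofList]
  | succ n ih =>
    intro ws hws
    match ws with
    | [] => simp [rtGo.eq_def, PySem.Set.ofList]
    | w :: rest =>
      rw [rtGo.eq_def]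
      simp only []
      rw [ih _ (le_trans (List.length_filter_le _ _) (Nat.lt_succ_iff.mp (by simpa using hws)))]
      have hperm := (ofList_cons_perm w rest).map (fun k => (PySem.Chars.len k : Int) - 1)
      rw [hperm.sum_eq]
      simp only [List.map_cons, List.sum_cons, List.length_cons]
      push_cast
      ring

theorem rtGo_eq (ws : List (List Char)) :
    rtGo ws = (ws.length : Int)
      + ((PySem.Set.ofList ws).map (fun k => (PySem.Chars.len k : Int) - 1)).sum :=
  rtGo_eq_aux ws.length ws le_rfl

-- ===== VERDICT (by name: the statement is the Claim_ definition above) =====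
theorem reading_time_spec : Claim_equal_reading_time := by
  intro article _
  unfold Spec_reading_time reading_time reading_time_alt
  simp only []
  rw [PySem.List.foldl_append_singleton_eq_map, List.nil_append, loopA, rtGo_eq,
    ← PySem.Set.ofList_eq_foldl]
  simp only [List.map_nil, List.sum_nil]
  ring
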